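-- pv_equiv track=rewrite | github.com/MNasilowski/Learning | Python/Codility_tasks/fibonaci_frog.py | solution
-- ===== SOURCE A (Python) =====
-- def fibonaci(N):
--     F = [1,2]
--     while True:
--         new_element = F[-1] + F[-2]
--         if new_element < N:
--             F.append(new_element)
--         elif new_element == N:
--             F.append(new_element)
--             break
--         else:
--             break
--     return F
--
-- def solution(A):
--     F = fibonaci(len(A)+1)
--     reachable = set()
--     position = 0
--     for i in F:
--         new_position = position+i
--         if new_position == len(A)+1:
--             return 1
--         elif new_position > len(A):
--             break
--         elif A[new_position-1] == 1:
--             reachable.add(position+i)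
--     new_set = set(reachable)
--     for jump in range(2,len(A)):
--         for position in reachable:
--             for i in F:
--                 new_position = position + i
--                 if new_position == len(A)+1:
--                     return jump
--                 elif new_position > len(A):
--                     break
--                 elif A[new_position-1] == 1:
--                     new_set.add(position+i)
--
--         if(len(reachable) == len(new_set)):
--             return -1
--         else:
--             reachable = set(new_set)
--     return -1
-- ===== SOURCE B (Python) =====
-- def solution(A):
--     n = len(A)
--     fibs = []
--     a, b = 1, 2
--     while a <= n + 1:
--         fibs.append(a)
--         a, b = b, a + b
--     visited = {0}
--     frontier = [0]
--     jumps = 0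
--     while frontier:
--         jumps += 1
--         moves = [p + f for p in frontier for f in fibs if p + f <= n + 1]
--         if n + 1 in moves:
--             return jumps
--         frontier = []
--         for q in moves:
--             if A[q - 1] == 1 and q not in visited:
--                 visited.add(q)
--                 frontier.append(q)
--     return -1
-- ===== Notes on version B (the rewrite author's own statement) =====
-- stated objective: alternative
-- what changed: A re-scans the entire reachable set (re-checking every already-processed position) on every BFS level, with the level counter capped by range(2,len(A)); B is a frontier BFS that per level materialises the candidate moves as one comprehension, tests the far bank by membership in that list, and filters it through a visited set, expanding only newly reached positions and stopping when the frontier empties.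
import Mathlib
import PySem

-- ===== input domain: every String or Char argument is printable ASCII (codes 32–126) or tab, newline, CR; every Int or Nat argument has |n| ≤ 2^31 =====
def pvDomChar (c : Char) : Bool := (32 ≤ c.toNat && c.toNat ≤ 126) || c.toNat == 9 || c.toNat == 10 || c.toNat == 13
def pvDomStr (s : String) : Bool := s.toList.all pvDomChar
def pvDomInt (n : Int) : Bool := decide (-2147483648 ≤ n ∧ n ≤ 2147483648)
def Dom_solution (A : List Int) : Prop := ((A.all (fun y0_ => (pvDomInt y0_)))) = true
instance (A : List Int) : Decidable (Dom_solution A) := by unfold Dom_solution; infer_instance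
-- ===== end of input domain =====

-- B replaces A's per-level rescan of the whole reachable set (capped by range(2,len(A))) by a
-- frontier BFS that first materialises the level's candidate moves as one comprehension, tests
-- the far bank by membership, and then filters the moves through a visited set.
-- Objective: alternative (frontier-only expansion, staged per level).

-- ===== PORT A =====
-- fibonaci's 'while True' loop; a = F[-2], b = F[-1]; terminates because b grows towards N
def fibLoopA (N a b : Int) (F : List Int) (ha : 1 ≤ a) (hb : a < b) : List Int :=
  if h1 : b + a < N then fibLoopA N b (b + a) (F ++ [b + a]) (by omega) (by omega)
  else if b + a = N then F ++ [b + a]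
  else F
termination_by (N - b).toNat
decreasing_by omega

def fibonaci (N : Int) : List Int := fibLoopA N 1 2 [1, 2] (by norm_num) (by norm_num)

-- the 'for i in F:' body of A (the first loop and the nested loop share it);
-- none = the 'return' was taken.  A[new_position-1] is always in range here, so pyGetD is exact.
def scanA (n : Int) (A F : List Int) (p : Int) (s : PySem.Set Int) : Option (PySem.Set Int) :=
  match F with
  | [] => some s
  | i :: F' =>
    if p + i = n + 1 then none
    else if p + i > n then some s
    else if PySem.List.pyGetD A (p + i - 1) 0 = 1 then scanA n A F' p (PySem.Set.add s (p + i))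
    else scanA n A F' p s

-- 'for position in reachable:'
def posLoopA (n : Int) (A F : List Int) (ps : List Int) (s : PySem.Set Int) :
    Option (PySem.Set Int) :=
  match ps with
  | [] => some s
  | p :: ps' =>
    match scanA n A F p s with
    | none => none
    | some s' => posLoopA n A F ps' s'

-- 'for jump in range(2,len(A)):'
def jumpLoopA (n : Int) (A F : List Int) (js : List Int) (reachable newset : PySem.Set Int) : Int :=
  match js with
  | [] => -1
  | j :: js' =>
    match posLoopA n A F reachable newset with
    | none => j
    | some s' =>
      if reachable.length = s'.length then -1
      else jumpLoopA n A F js' s' s'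

def solution (A : List Int) : Int :=
  let n : Int := A.length
  let F := fibonaci (n + 1)
  match scanA n A F 0 PySem.Set.empty with
  | none => 1
  | some reachable => jumpLoopA n A F (PySem.List.pyRange 2 n 1) reachable reachable

-- ===== PORT B =====
-- Source B's 'while a <= n + 1: fibs.append(a); a, b = b, a + b'
def fibLoopB (N a b : Int) (acc : List Int) (ha : 1 ≤ a) (hb : a < b) : List Int :=
  if h : a ≤ N then fibLoopB N b (a + b) (acc ++ [a]) (by omega) (by omega) else acc
termination_by (N + 1 - a).toNat
decreasing_by omega

def fibsB (N : Int) : List Int := fibLoopB N 1 2 [] (by norm_num) (by norm_num)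

-- '[p + f for p in frontier for f in fibs if p + f <= n + 1]'
def movesB (n : Int) (F frontier : List Int) : List Int :=
  frontier.flatMap (fun p => (F.filter (fun f => p + f ≤ n + 1)).map (fun f => p + f))

-- 'for q in moves: if A[q - 1] == 1 and q not in visited: …'  (index always in range: pyGetD exact)
def growB (A : List Int) (qs : List Int) (V : PySem.Set Int) (fr : List Int) :
    PySem.Set Int × List Int :=
  match qs with
  | [] => (V, fr)
  | q :: qs' =>
    if PySem.List.pyGetD A (q - 1) 0 = 1 ∧ q ∉ V then
      growB A qs' (PySem.Set.add V q) (fr ++ [q])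
    else growB A qs' V fr

-- 'while frontier:' — the fuel only makes the loop structural; A.length + 2 iterations always suffice
def bfsB (fuel : Nat) (n : Int) (A F : List Int) (V : PySem.Set Int)
    (frontier : List Int) (jumps : Int) : Int :=
  match fuel with
  | 0 => -1
  | fuel' + 1 =>
    match frontier with
    | [] => -1
    | _ :: _ =>
      let moves := movesB n F frontier
      if (n + 1) ∈ moves then jumps + 1
      else
        let vf := growB A moves V []
        bfsB fuel' n A F vf.1 vf.2 (jumps + 1)

def solution_alt (A : List Int) : Int :=
  let n : Int := A.length
  let F := fibsB (n + 1)
  bfsB (A.length + 2) n A F (PySem.Set.ofList [0]) [0] 0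

-- ===== PRECONDITION & SPEC =====
def Spec_solution (A : List Int) (out : Int) : Prop := out = solution_alt A
instance (A : List Int) (out : Int) : Decidable (Spec_solution A out) := by unfold Spec_solution; infer_instance

-- ===== CLAIM (what is proved, stated in full; the proofs are below) =====
def Claim_equal_solution : Prop := ∀ (A : List Int), Dom_solution A → Spec_solution A (solution A)

-- ===== LEMMAS AND PROOFS =====

-- ---- the two Fibonacci builders ----

theorem fibLoopB_congr (N a b a' b' : Int) (acc acc' : List Int) (ha : 1 ≤ a) (hb : a < b)
    (hA : a = a') (hB : b = b') (hacc : acc = acc') :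
    fibLoopB N a b acc ha hb = fibLoopB N a' b' acc' (hA ▸ ha) (hA ▸ hB ▸ hb) := by
  subst hA; subst hB; subst hacc; rfl

theorem fibLoopAB (N : Int) : ∀ (a b : Int) (F : List Int) (ha : 1 ≤ a) (hb : a < b),
    fibLoopA N a b F ha hb =
      fibLoopB N (a + b) (a + 2 * b) F (by omega) (by omega) := by
  intro a b F ha hb
  fun_induction fibLoopA with
  | case1 a b F ha hb h1 ih =>
    rw [fibLoopB]
    simp only [show a + b ≤ N by omega, dite_true]
    rw [ih]
    exact fibLoopB_congr N (b + (b + a)) (b + 2 * (b + a)) (a + 2 * b) (a + b + (a + 2 * b))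
      (F ++ [b + a]) (F ++ [a + b]) (by omega) (by omega) (by ring) (by ring) (by rw [Int.add_comm])
  | case2 a b F ha hb h1 h2 =>
    rw [fibLoopB]
    simp only [show a + b ≤ N by omega, dite_true]
    rw [fibLoopB]
    simp only [show ¬ (a + 2 * b ≤ N) by omega, dite_false]
    rw [Int.add_comm b a]
  | case3 a b F ha hb h1 h2 =>
    rw [fibLoopB]
    simp only [show ¬ (a + b ≤ N) by omega, dite_false]

theorem fibsB_unfold2 (N : Int) (h : 2 ≤ N) :
    fibsB N = fibLoopB N 3 5 [1, 2] (by norm_num) (by norm_num) := by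
  rw [fibsB, fibLoopB]
  simp only [show (1:Int) ≤ N by omega, dite_true]
  rw [fibLoopB]
  simp only [show (2:Int) ≤ N by omega, dite_true]
  exact fibLoopB_congr N (1 + 2) (2 + (1 + 2)) 3 5 ([] ++ [1] ++ [2]) [1, 2] (by norm_num)
    (by norm_num) (by norm_num) (by norm_num) (by norm_num)

theorem fib_eq (N : Int) (h : 2 ≤ N) : fibonaci N = fibsB N := by
  rw [fibonaci, fibLoopAB, fibsB_unfold2 N h]
  exact fibLoopB_congr N (1 + 2) (1 + 2 * 2) 3 5 [1, 2] [1, 2] (by norm_num) (by norm_num)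
    (by norm_num) (by norm_num) rfl

theorem fibLoopB_prefix (N a b : Int) (acc : List Int) (ha : 1 ≤ a) (hb : a < b) :
    ∃ t, fibLoopB N a b acc ha hb = acc ++ t := by
  fun_induction fibLoopB with
  | case1 a b acc ha hb h1 ih =>
    obtain ⟨t, ht⟩ := ih
    exact ⟨[a] ++ t, by simp [ht]⟩
  | case2 => exact ⟨[], by simp⟩

theorem fibLoopB_props (N a b : Int) (acc : List Int) (ha : 1 ≤ a) (hb : a < b)
    (hF : ∀ x ∈ acc, 1 ≤ x ∧ x < a) (hp : acc.Pairwise (· < ·)) :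
    (∀ x ∈ fibLoopB N a b acc ha hb, 1 ≤ x) ∧ (fibLoopB N a b acc ha hb).Pairwise (· < ·) := by
  fun_induction fibLoopB with
  | case1 a b acc ha hb h1 ih =>
    apply ih
    · intro x hx
      rcases List.mem_append.1 hx with h | h
      · have := hF x h; omega
      · simp at h; omega
    · rw [List.pairwise_append]
      refine ⟨hp, by simp, ?_⟩
      intro x hx y hy; simp at hy; have := hF x hx; omega
  | case2 a b acc ha hb h1 =>
    exact ⟨fun x hx => (hF x hx).1, hp⟩

theorem fibsB_pos (N : Int) : ∀ f ∈ fibsB N, 1 ≤ f :=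
  (fibLoopB_props N 1 2 [] (by norm_num) (by norm_num) (by simp) (by simp)).1

theorem fibsB_sorted (N : Int) : (fibsB N).Pairwise (· < ·) :=
  (fibLoopB_props N 1 2 [] (by norm_num) (by norm_num) (by simp) (by simp)).2

theorem one_mem_fibsB (N : Int) (h : 2 ≤ N) : (1 : Int) ∈ fibsB N := by
  obtain ⟨t, ht⟩ := fibLoopB_prefix N 3 5 [1,2] (by norm_num) (by norm_num)
  rw [fibsB_unfold2 N h, ht]; simp

theorem two_mem_fibsB (N : Int) (h : 2 ≤ N) : (2 : Int) ∈ fibsB N := by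
  obtain ⟨t, ht⟩ := fibLoopB_prefix N 3 5 [1,2] (by norm_num) (by norm_num)
  rw [fibsB_unfold2 N h, ht]; simp

theorem three_mem_fibsB (N : Int) (h : 3 ≤ N) : (3 : Int) ∈ fibsB N := by
  rw [fibsB_unfold2 N (by omega), fibLoopB]
  simp only [show (3:Int) ≤ N by omega, dite_true]
  obtain ⟨t, ht⟩ := fibLoopB_prefix N 5 (3 + 5) ([1,2] ++ [3]) (by norm_num) (by norm_num)
  rw [ht]; simp

-- ---- behaviour of A's inner scan ----

theorem scanA_not_mem_of_some (n : Int) (A : List Int) (p : Int) :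
    ∀ (G : List Int) (s s' : PySem.Set Int), G.Pairwise (· < ·) →
      scanA n A G p s = some s' → (n + 1 - p) ∉ G := by
  intro G
  induction G with
  | nil => intro s s' _ _; simp
  | cons i G' ih =>
    intro s s' hp h
    rw [scanA] at h
    by_cases h1 : p + i = n + 1
    · simp [h1] at h
    · simp only [h1, if_false] at h
      by_cases h2 : p + i > n
      · intro hm
        rcases List.mem_cons.1 hm with hh | hh
        · omega
        · have := (List.pairwise_cons.1 hp).1 _ hh; omega
      · simp only [h2, if_false] at h
        intro hm
        rcases List.mem_cons.1 hm with hh | hh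
        · omega
        · refine absurd hh (?_)
          split at h
          · exact ih _ _ (List.pairwise_cons.1 hp).2 h
          · exact ih _ _ (List.pairwise_cons.1 hp).2 h

theorem scanA_none_of_mem (n : Int) (A : List Int) (p : Int) :
    ∀ (G : List Int) (s : PySem.Set Int), G.Pairwise (· < ·) →
      (n + 1 - p) ∈ G → scanA n A G p s = none := by
  intro G
  induction G with
  | nil => intro s _ hm; simp at hm
  | cons i G' ih =>
    intro s hp hm
    rw [scanA]
    by_cases h1 : p + i = n + 1
    · simp [h1]
    · simp only [h1, if_false]
      have hm' : (n + 1 - p) ∈ G' := by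
        rcases List.mem_cons.1 hm with hh | hh
        · omega
        · exact hh
      have hlt : i < n + 1 - p := (List.pairwise_cons.1 hp).1 _ hm'
      simp only [show ¬ (p + i > n) by omega, if_false]
      split
      · exact ih _ (List.pairwise_cons.1 hp).2 hm'
      · exact ih _ (List.pairwise_cons.1 hp).2 hm'

theorem scanA_frozen (n : Int) (A : List Int) (p : Int) :
    ∀ (G : List Int) (s : PySem.Set Int),
      (∀ f ∈ G, p + f ≠ n + 1) →
      (∀ f ∈ G, p + f ≤ n → PySem.List.pyGetD A (p + f - 1) 0 = 1 → (p + f) ∈ s) →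
      scanA n A G p s = some s := by
  intro G
  induction G with
  | nil => intro s _ _; rw [scanA]
  | cons i G' ih =>
    intro s h1 h2
    rw [scanA]
    simp only [h1 i (List.mem_cons_self), if_false]
    by_cases hb : p + i > n
    · simp [hb]
    · simp only [hb, if_false]
      split
      · rename_i hleaf
        have hmem : (p + i) ∈ s := h2 i List.mem_cons_self (by omega) hleaf
        rw [show PySem.Set.add s (p + i) = s by simp [PySem.Set.add, PySem.Set.contains, hmem]]
        exact ih s (fun f hf => h1 f (List.mem_cons_of_mem _ hf))
          (fun f hf => h2 f (List.mem_cons_of_mem _ hf))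
      · exact ih s (fun f hf => h1 f (List.mem_cons_of_mem _ hf))
          (fun f hf => h2 f (List.mem_cons_of_mem _ hf))

theorem scanA_some_facts (n : Int) (A : List Int) (p : Int) :
    ∀ (G : List Int) (s s' : PySem.Set Int), G.Pairwise (· < ·) →
      scanA n A G p s = some s' →
      (∃ t, s' = s ++ t) ∧
      (∀ f ∈ G, p + f ≤ n → PySem.List.pyGetD A (p + f - 1) 0 = 1 → (p + f) ∈ s') ∧
      (∀ q ∈ s', q ∈ s ∨ (q ≤ n ∧ PySem.List.pyGetD A (q - 1) 0 = 1 ∧ ∃ f ∈ G, q = p + f)) ∧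
      (s.Nodup → s'.Nodup) := by
  intro G
  induction G with
  | nil =>
    intro s s' _ h
    rw [scanA] at h
    obtain rfl : s = s' := by simpa using h
    exact ⟨⟨[], by simp⟩, by simp, fun q hq => Or.inl hq, fun h => h⟩
  | cons i G' ih =>
    intro s s' hp h
    rw [scanA] at h
    by_cases h1 : p + i = n + 1
    · simp [h1] at h
    · simp only [h1, if_false] at h
      by_cases h2 : p + i > n
      · simp only [h2, if_true] at h
        obtain rfl : s = s' := by simpa using h
        refine ⟨⟨[], by simp⟩, ?_, fun q hq => Or.inl hq, fun h => h⟩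
        intro f hf hle _
        rcases List.mem_cons.1 hf with hh | hh
        · omega
        · have := (List.pairwise_cons.1 hp).1 _ hh; omega
      · simp only [h2, if_false] at h
        by_cases hleaf : PySem.List.pyGetD A (p + i - 1) 0 = 1
        · simp only [hleaf, if_true] at h
          obtain ⟨⟨t, ht⟩, habs, hnew, hnd⟩ := ih _ _ (List.pairwise_cons.1 hp).2 h
          by_cases hmem : (p + i) ∈ s
          · rw [show PySem.Set.add s (p + i) = s by
              simp [PySem.Set.add, PySem.Set.contains, hmem]] at ht hnew hnd
            refine ⟨⟨t, ht⟩, ?_, ?_, hnd⟩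
            · intro f hf hle hl
              rcases List.mem_cons.1 hf with hh | hh
              · subst hh; rw [ht]; exact List.mem_append_left _ hmem
              · exact habs f hh hle hl
            · intro q hq
              rcases hnew q hq with hh | ⟨hq1, hq2, f, hf, hq3⟩
              · exact Or.inl hh
              · exact Or.inr ⟨hq1, hq2, f, List.mem_cons_of_mem _ hf, hq3⟩
          · rw [show PySem.Set.add s (p + i) = s ++ [p + i] by
              simp [PySem.Set.add, PySem.Set.contains, hmem]] at ht hnew hnd
            refine ⟨⟨[p + i] ++ t, by rw [ht, List.append_assoc]⟩, ?_, ?_, ?_⟩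
            · intro f hf hle hl
              rcases List.mem_cons.1 hf with hh | hh
              · subst hh; rw [ht]; exact List.mem_append_left _ (by simp)
              · exact habs f hh hle hl
            · intro q hq
              rcases hnew q hq with hh | ⟨hq1, hq2, f, hf, hq3⟩
              · rcases List.mem_append.1 hh with hh' | hh'
                · exact Or.inl hh'
                · simp at hh'
                  refine Or.inr ⟨by omega, by rw [hh']; simpa using hleaf, i, List.mem_cons_self, hh'⟩
              · exact Or.inr ⟨hq1, hq2, f, List.mem_cons_of_mem _ hf, hq3⟩
            · intro hs
              exact hnd ((List.nodup_append_comm).2 (by simp [hs, hmem]))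
        · simp only [hleaf, if_false] at h
          obtain ⟨⟨t, ht⟩, habs, hnew, hnd⟩ := ih _ _ (List.pairwise_cons.1 hp).2 h
          refine ⟨⟨t, ht⟩, ?_, ?_, hnd⟩
          · intro f hf hle hl
            rcases List.mem_cons.1 hf with hh | hh
            · subst hh; exact absurd hl hleaf
            · exact habs f hh hle hl
          · intro q hq
            rcases hnew q hq with hh | ⟨hq1, hq2, f, hf, hq3⟩
            · exact Or.inl hh
            · exact Or.inr ⟨hq1, hq2, f, List.mem_cons_of_mem _ hf, hq3⟩

-- ---- A's inner scan against B's filter-map + visited filter, for one frontier position ----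

theorem growB_append (A : List Int) :
    ∀ (xs ys : List Int) (V : PySem.Set Int) (fr : List Int),
      growB A (xs ++ ys) V fr = growB A ys (growB A xs V fr).1 (growB A xs V fr).2 := by
  intro xs
  induction xs with
  | nil => intro ys V fr; rw [growB]; simp
  | cons q xs' ih =>
    intro ys V fr
    rw [List.cons_append, growB, growB]
    split
    · exact ih ys _ _
    · exact ih ys _ _

theorem scan_grow_sim (n : Int) (A : List Int) (p : Int) (hp : 0 ≤ p) :
    ∀ (G : List Int), G.Pairwise (· < ·) → (∀ f ∈ G, 1 ≤ f) → (n + 1 - p) ∉ G →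
    ∀ (s : PySem.Set Int) (acc : List Int),
      ∃ t, scanA n A G p s = some (s ++ t) ∧
        growB A ((G.filter (fun f => p + f ≤ n + 1)).map (fun f => p + f)) (0 :: s) acc
          = (0 :: (s ++ t), acc ++ t) := by
  intro G
  induction G with
  | nil =>
    intro _ _ _ s acc
    exact ⟨[], by rw [scanA]; simp, by rw [List.filter_nil, List.map_nil, growB]; simp⟩
  | cons i G' ih =>
    intro hps hG1 hmiss s acc
    have hne : p + i ≠ n + 1 := fun h => hmiss (List.mem_cons.2 (Or.inl (by omega)))
    have hmiss' : (n + 1 - p) ∉ G' := fun h => hmiss (List.mem_cons_of_mem _ h)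
    have hps' := (List.pairwise_cons.1 hps).2
    have hG1' : ∀ f ∈ G', 1 ≤ f := fun f h => hG1 f (List.mem_cons_of_mem _ h)
    rw [scanA]
    simp only [hne, if_false]
    by_cases h2 : p + i > n
    · -- break in A; in B the filter drops i and (G' being larger) everything after it
      have hdrop : (i :: G').filter (fun f => decide (p + f ≤ n + 1)) = [] := by
        rw [List.filter_eq_nil_iff]
        intro f hf
        simp only [decide_eq_true_eq]
        rcases List.mem_cons.1 hf with rfl | hf'
        · omega
        · have := (List.pairwise_cons.1 hps).1 _ hf'; omega
      refine ⟨[], by simp [h2], ?_⟩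
      rw [hdrop, List.map_nil, growB]
      simp
    · simp only [h2, if_false]
      have hkeep : (i :: G').filter (fun f => decide (p + f ≤ n + 1)) =
          i :: G'.filter (fun f => decide (p + f ≤ n + 1)) := by
        rw [List.filter_cons, if_pos (by simp only [decide_eq_true_eq]; omega)]
      rw [hkeep, List.map_cons, growB]
      have hq1 : 1 ≤ p + i := by have := hG1 i List.mem_cons_self; omega
      have hmem0 : (p + i) ∈ (0 :: s : List Int) ↔ (p + i) ∈ s := by
        simp only [List.mem_cons]
        constructor
        · rintro (h | h)
          · omega
          · exact h
        · exact Or.inr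
      by_cases hleaf : PySem.List.pyGetD A (p + i - 1) 0 = 1
      · by_cases hmem : (p + i) ∈ s
        · -- A's set-add is a no-op, B skips the already-visited move
          rw [if_pos hleaf, if_neg (by rw [hmem0]; exact fun hc => hc.2 hmem)]
          rw [show PySem.Set.add s (p + i) = s by
            simp [PySem.Set.add, PySem.Set.contains, hmem]]
          exact ih hps' hG1' hmiss' s acc
        · rw [if_pos hleaf, if_pos ⟨hleaf, by rw [hmem0]; exact hmem⟩]
          rw [show PySem.Set.add s (p + i) = s ++ [p + i] by
            simp [PySem.Set.add, PySem.Set.contains, hmem]]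
          rw [show PySem.Set.add (0 :: s) (p + i) = 0 :: (s ++ [p + i]) by
            simp [PySem.Set.add, PySem.Set.contains, hmem0, hmem]]
          obtain ⟨t, ha, hb⟩ := ih hps' hG1' hmiss' (s ++ [p + i]) (acc ++ [p + i])
          refine ⟨[p + i] ++ t, ?_, ?_⟩
          · rw [ha]; simp
          · rw [hb]; simp
      · rw [if_neg hleaf, if_neg (by tauto)]
        exact ih hps' hG1' hmiss' s acc

-- ---- position-loop level ----

theorem posLoopA_append (n : Int) (A G : List Int) :
    ∀ (xs ys : List Int) (s : PySem.Set Int),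
      posLoopA n A G (xs ++ ys) s =
        match posLoopA n A G xs s with
        | none => none
        | some s' => posLoopA n A G ys s' := by
  intro xs
  induction xs with
  | nil => intro ys s; rw [posLoopA]; simp
  | cons p xs' ih =>
    intro ys s
    rw [List.cons_append, posLoopA, posLoopA]
    cases scanA n A G p s with
    | none => rfl
    | some s' => exact ih ys s'

theorem posLoopA_frozen (n : Int) (A G : List Int) :
    ∀ (ps : List Int) (s : PySem.Set Int),
      (∀ p ∈ ps, (∀ f ∈ G, p + f ≠ n + 1) ∧
        (∀ f ∈ G, p + f ≤ n → PySem.List.pyGetD A (p + f - 1) 0 = 1 → (p + f) ∈ s)) →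
      posLoopA n A G ps s = some s := by
  intro ps
  induction ps with
  | nil => intro s _; rw [posLoopA]
  | cons p ps' ih =>
    intro s h
    rw [posLoopA]
    rw [scanA_frozen n A p G s (h p List.mem_cons_self).1 (h p List.mem_cons_self).2]
    exact ih s (fun q hq => h q (List.mem_cons_of_mem _ hq))

theorem posLoopA_facts (n : Int) (A G : List Int) (hG : G.Pairwise (· < ·)) :
    ∀ (ps : List Int) (s s' : PySem.Set Int),
      posLoopA n A G ps s = some s' →
      (∃ t, s' = s ++ t) ∧
      (∀ p ∈ ps, (n + 1 - p) ∉ G) ∧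
      (∀ p ∈ ps, ∀ f ∈ G, p + f ≤ n → PySem.List.pyGetD A (p + f - 1) 0 = 1 → (p + f) ∈ s') ∧
      (∀ q ∈ s', q ∈ s ∨ (q ≤ n ∧ PySem.List.pyGetD A (q - 1) 0 = 1 ∧
          ∃ f ∈ G, ∃ p ∈ ps, q = p + f)) ∧
      (s.Nodup → s'.Nodup) := by
  intro ps
  induction ps with
  | nil =>
    intro s s' h
    rw [posLoopA] at h
    obtain rfl : s = s' := by simpa using h
    exact ⟨⟨[], by simp⟩, by simp, by simp, fun q hq => Or.inl hq, fun h => h⟩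
  | cons p ps' ih =>
    intro s s' h
    rw [posLoopA] at h
    cases hscan : scanA n A G p s with
    | none => rw [hscan] at h; simp at h
    | some s1 =>
      rw [hscan] at h
      obtain ⟨⟨t1, ht1⟩, habs1, hnew1, hnd1⟩ := scanA_some_facts n A p G s s1 hG hscan
      obtain ⟨⟨t2, ht2⟩, hnm2, habs2, hnew2, hnd2⟩ := ih s1 s' h
      have hsub : ∀ q ∈ s1, q ∈ s' := by
        intro q hq; rw [ht2]; exact List.mem_append_left _ hq
      refine ⟨⟨t1 ++ t2, by rw [ht2, ht1, List.append_assoc]⟩, ?_, ?_, ?_, fun hs => hnd2 (hnd1 hs)⟩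
      · intro q hq
        rcases List.mem_cons.1 hq with hh | hh
        · subst hh; exact scanA_not_mem_of_some n A q G s s1 hG hscan
        · exact hnm2 q hh
      · intro q hq f hf hle hl
        rcases List.mem_cons.1 hq with hh | hh
        · subst hh; exact hsub _ (habs1 f hf hle hl)
        · exact habs2 q hh f hf hle hl
      · intro q hq
        rcases hnew2 q hq with hh | ⟨hq1, hq2, f, hf, p', hp', hq3⟩
        · rcases hnew1 q hh with hh' | ⟨hq1, hq2, f, hf, hq3⟩
          · exact Or.inl hh'
          · exact Or.inr ⟨hq1, hq2, f, hf, p, List.mem_cons_self, hq3⟩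
        · exact Or.inr ⟨hq1, hq2, f, hf, p', List.mem_cons_of_mem _ hp', hq3⟩

theorem movesB_cons (n : Int) (G : List Int) (p : Int) (ps : List Int) :
    movesB n G (p :: ps) =
      ((G.filter (fun f => p + f ≤ n + 1)).map (fun f => p + f)) ++ movesB n G ps := by
  rw [movesB, movesB, List.flatMap_cons]

theorem mem_movesB (n : Int) (G : List Int) (ps : List Int) :
    (n + 1) ∈ movesB n G ps ↔ ∃ p ∈ ps, (n + 1 - p) ∈ G := by
  simp only [movesB, List.mem_flatMap, List.mem_map, List.mem_filter, decide_eq_true_eq]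
  constructor
  · rintro ⟨p, hp, f, ⟨hf, _⟩, he⟩
    exact ⟨p, hp, by rw [show n + 1 - p = f by omega]; exact hf⟩
  · rintro ⟨p, hp, hf⟩
    exact ⟨p, hp, n + 1 - p, ⟨hf, by omega⟩, by omega⟩

theorem posLoopA_none_of_hit (n : Int) (A G : List Int) (hGs : G.Pairwise (· < ·))
    (hG1 : ∀ f ∈ G, 1 ≤ f) :
    ∀ (ps : List Int), (∀ p ∈ ps, 0 ≤ p) → (∃ p ∈ ps, (n + 1 - p) ∈ G) →
    ∀ (s : PySem.Set Int), posLoopA n A G ps s = none := by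
  intro ps
  induction ps with
  | nil => rintro _ ⟨p, hp, _⟩; simp at hp
  | cons p ps' ih =>
    rintro hpos ⟨q, hq, hqm⟩ s
    rw [posLoopA]
    by_cases hph : (n + 1 - p) ∈ G
    · rw [scanA_none_of_mem n A p G s hGs hph]
    · obtain ⟨t, ha, _⟩ := scan_grow_sim n A p (hpos p List.mem_cons_self) G hGs hG1 hph s []
      rw [ha]
      have hq' : q ∈ ps' := by
        rcases List.mem_cons.1 hq with hh | hh
        · subst hh; exact absurd hqm hph
        · exact hh
      exact ih (fun r hr => hpos r (List.mem_cons_of_mem _ hr)) ⟨q, hq', hqm⟩ _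

theorem pos_grow_sim (n : Int) (A G : List Int) (hGs : G.Pairwise (· < ·))
    (hG1 : ∀ f ∈ G, 1 ≤ f) :
    ∀ (ps : List Int), (∀ p ∈ ps, 0 ≤ p) → (∀ p ∈ ps, (n + 1 - p) ∉ G) →
    ∀ (s : PySem.Set Int) (acc : List Int),
      ∃ t, posLoopA n A G ps s = some (s ++ t) ∧
        growB A (movesB n G ps) (0 :: s) acc = (0 :: (s ++ t), acc ++ t) := by
  intro ps
  induction ps with
  | nil =>
    intro _ _ s acc
    exact ⟨[], by rw [posLoopA]; simp, by rw [movesB]; simp [growB]⟩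
  | cons p ps' ih =>
    intro hpos hmiss s acc
    obtain ⟨t, ha, hb⟩ := scan_grow_sim n A p (hpos p List.mem_cons_self) G hGs hG1
      (hmiss p List.mem_cons_self) s acc
    rw [posLoopA, ha, movesB_cons, growB_append, hb]
    obtain ⟨t', ha', hb'⟩ := ih (fun r hr => hpos r (List.mem_cons_of_mem _ hr))
      (fun r hr => hmiss r (List.mem_cons_of_mem _ hr)) (s ++ t) (acc ++ t)
    refine ⟨t ++ t', ?_, ?_⟩
    · simpa [List.append_assoc] using ha'
    · simpa [List.append_assoc] using hb'

-- ---- counting helper (pigeonhole for the impossible loop exhaustion) ----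

theorem nodup_length_le (l : List Int) (a b : Int) (hnd : l.Nodup)
    (hb : ∀ x ∈ l, a ≤ x ∧ x ≤ b) : l.length ≤ (b + 1 - a).toNat := by
  have h1 : l.toFinset.card = l.length := List.toFinset_card_of_nodup hnd
  have h2 : l.toFinset ⊆ Finset.Icc a b := by
    intro x hx
    simp only [List.mem_toFinset] at hx
    simp only [Finset.mem_Icc]
    exact hb x hx
  have h3 := Finset.card_le_card h2
  rw [h1, Int.card_Icc] at h3
  exact h3

theorem bfsB_nil (fuel : Nat) (n : Int) (A G : List Int) (V : PySem.Set Int) (k : Int) :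
    bfsB fuel n A G V [] k = -1 := by cases fuel <;> rfl

theorem bfsB_cons (fuel : Nat) (n : Int) (A G : List Int) (V : PySem.Set Int)
    (fr : List Int) (hfr : fr ≠ []) (k : Int) :
    bfsB (fuel + 1) n A G V fr k =
      if (n + 1) ∈ movesB n G fr then k + 1
      else bfsB fuel n A G (growB A (movesB n G fr) V []).1 (growB A (movesB n G fr) V []).2
        (k + 1) := by
  cases fr with
  | nil => exact absurd rfl hfr
  | cons a l => rfl

-- ---- the level invariant relating A's state (Rp ++ Fr) to B's (visited 0::(Rp++Fr), frontier Fr) ----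

def BfsInv (n : Int) (A G Rp Fr : List Int) : Prop :=
  (∀ p ∈ (0 :: Rp : List Int),
     (n + 1 - p) ∉ G ∧
     (∀ f ∈ G, p + f ≤ n → PySem.List.pyGetD A (p + f - 1) 0 = 1 → (p + f) ∈ Rp ++ Fr)) ∧
  (∀ q ∈ Rp ++ Fr, 1 ≤ q ∧ q ≤ n ∧ PySem.List.pyGetD A (q - 1) 0 = 1) ∧
  (Rp ++ Fr).Nodup

-- ---- the main simulation: A's jump loop against B's while loop ----

theorem jump_sim (n : Int) (A G : List Int)
    (hG1 : ∀ f ∈ G, 1 ≤ f) (hGs : G.Pairwise (· < ·))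
    (h1G : (1:Int) ∈ G) (h2G : (2:Int) ∈ G) (h3G : (3:Int) ∈ G) :
    ∀ (fuel : Nat) (j : Int) (Rp Fr : List Int),
      2 ≤ j → j ≤ n → (j = 2 → 3 ≤ n) →
      BfsInv n A G Rp Fr →
      (3 ≤ j → (j - 1 ≤ ((Rp ++ Fr).length : Int) ∧ j - 2 ≤ (Rp.length : Int))) →
      (PySem.List.pyRange j n 1).length ≤ fuel →
      jumpLoopA n A G (PySem.List.pyRange j n 1) (Rp ++ Fr) (Rp ++ Fr) =
        bfsB fuel n A G (0 :: (Rp ++ Fr)) Fr (j - 1) := by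
  intro fuel
  induction fuel with
  | zero =>
    intro j Rp Fr _ _ _ _ _ hfuel
    have h0 : (PySem.List.pyRange j n 1).length = 0 := Nat.le_zero.1 hfuel
    rw [List.length_eq_zero_iff.1 h0, jumpLoopA, bfsB]
  | succ fuel ih =>
    intro j Rp Fr h2j hjn hj2 hInv hsize hfuel
    obtain ⟨hc, hd, hnd⟩ := hInv
    by_cases hjlt : j < n
    case neg =>
      -- range exhausted: impossible (the reachable set would not fit below the hit positions)
      exfalso
      have hjeq : j = n := le_antisymm hjn (by omega)
      have h3n : 3 ≤ n := by
        rcases eq_or_lt_of_le h2j with h | h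
        · exact hj2 h.symm
        · omega
      have hsz := hsize (by omega)
      have hRp_range : ∀ p ∈ Rp, 1 ≤ p ∧ p ≤ n - 3 := by
        intro p hp
        have hdp := hd p (List.mem_append_left _ hp)
        have hcp := (hc p (List.mem_cons_of_mem _ hp)).1
        refine ⟨hdp.1, ?_⟩
        by_contra hgt
        have : n + 1 - p = 1 ∨ n + 1 - p = 2 ∨ n + 1 - p = 3 := by omega
        rcases this with h | h | h <;> rw [h] at hcp
        · exact hcp h1G
        · exact hcp h2G
        · exact hcp h3G
      have hndRp : Rp.Nodup := (List.nodup_append.1 hnd).1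
      have hlen := nodup_length_le Rp 1 (n - 3) hndRp hRp_range
      omega
    case pos =>
      rw [PySem.List.pyRange_one_cons hjlt, jumpLoopA]
      have hfrozen : posLoopA n A G Rp (Rp ++ Fr) = some (Rp ++ Fr) := by
        apply posLoopA_frozen
        intro p hp
        have hcp := hc p (List.mem_cons_of_mem _ hp)
        refine ⟨?_, hcp.2⟩
        intro f hf heq
        exact hcp.1 (by rw [show n + 1 - p = f by omega]; exact hf)
      have hposA : posLoopA n A G (Rp ++ Fr) (Rp ++ Fr) = posLoopA n A G Fr (Rp ++ Fr) := by
        rw [posLoopA_append, hfrozen]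
      by_cases hFrE : Fr = []
      · subst hFrE
        rw [hposA]
        simp only [List.append_nil] at *
        rw [show posLoopA n A G ([] : List Int) Rp = some Rp from rfl, bfsB_nil]
        simp
      · have hFrpos : ∀ p ∈ Fr, 0 ≤ p := by
          intro p hp
          have := hd p (List.mem_append_right _ hp)
          omega
        rw [bfsB_cons fuel n A G _ Fr hFrE]
        by_cases hhit : ∃ p ∈ Fr, (n + 1 - p) ∈ G
        · -- this level reaches the far bank: A returns j, B returns (j-1)+1
          rw [hposA, posLoopA_none_of_hit n A G hGs hG1 Fr hFrpos hhit,
            if_pos ((mem_movesB n G Fr).2 hhit)]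
          show j = j - 1 + 1
          omega
        · have hmiss : ∀ p ∈ Fr, (n + 1 - p) ∉ G := by
            intro p hp hm; exact hhit ⟨p, hp, hm⟩
          obtain ⟨t, ha, hb⟩ := pos_grow_sim n A G hGs hG1 Fr hFrpos hmiss (Rp ++ Fr) []
          rw [hposA, ha, if_neg (fun hm => hhit ((mem_movesB n G Fr).1 hm)), hb]
          simp only [List.nil_append]
          by_cases htE : t = []
          · subst htE
            simp only [List.append_nil]
            rw [bfsB_nil]
            simp
          · have htlen : 1 ≤ t.length := by
              cases t
              · exact absurd rfl htE
              · simp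
            rw [if_neg (by simp; omega)]
            -- facts about the processed level
            obtain ⟨_, hnm2, habs2, hnew2, hnd2⟩ :=
              posLoopA_facts n A G hGs Fr (Rp ++ Fr) ((Rp ++ Fr) ++ t) ha
            have hstep := ih (j + 1) (Rp ++ Fr) t (by omega) (by omega) (by omega) ?_ ?_ ?_
            · rw [show j - 1 + 1 = j + 1 - 1 by omega]
              simpa using hstep
            · -- the invariant at the next level
              refine ⟨?_, ?_, hnd2 hnd⟩
              · intro p hp
                rcases List.mem_cons.1 hp with hp0 | hpR
                · subst hp0
                  have hcp := hc 0 List.mem_cons_self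
                  exact ⟨hcp.1, fun f hf hle hl => List.mem_append_left _ (hcp.2 f hf hle hl)⟩
                · rcases List.mem_append.1 hpR with hpp | hpf
                  · have hcp := hc p (List.mem_cons_of_mem _ hpp)
                    exact ⟨hcp.1, fun f hf hle hl => List.mem_append_left _ (hcp.2 f hf hle hl)⟩
                  · exact ⟨hnm2 p hpf, fun f hf hle hl => habs2 p hpf f hf hle hl⟩
              · intro q hq
                rcases hnew2 q hq with hh | ⟨hq1, hq2, f, hf, p', hp', hq3⟩
                · exact hd q hh
                · have hp'1 : 1 ≤ p' := (hd p' (List.mem_append_right _ hp')).1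
                  have hf1 : 1 ≤ f := hG1 f hf
                  exact ⟨by omega, hq1, hq2⟩
            · -- sizes
              intro _
              have hFrlen : 1 ≤ Fr.length := by
                cases Fr
                · exact absurd rfl hFrE
                · simp
              rcases eq_or_lt_of_le h2j with h | h
              · simp only [List.length_append]
                constructor <;> push_cast <;> omega
              · have := (hsize (by omega)).1
                simp only [List.length_append] at this ⊢
                constructor <;> push_cast at this ⊢ <;> omega
            · -- fuel
              rw [PySem.List.length_pyRange_one] at hfuel ⊢
              omega

-- ---- top-level assembly ----

theorem solution_nil : solution [] = 1 ∧ solution_alt [] = 1 := by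
  constructor
  · rw [solution]
    have hF : fibonaci 1 = [1, 2] := by rw [fibonaci, fibLoopA]; norm_num
    simp [hF, scanA]
  · rw [solution_alt]
    have hF : fibsB 1 = [1] := by
      rw [fibsB, fibLoopB]; norm_num; rw [fibLoopB]; norm_num
    simp [hF, bfsB, movesB]

theorem solution_eq_alt (A : List Int) : solution A = solution_alt A := by
  by_cases hA : A = []
  · subst hA; rw [solution_nil.1, solution_nil.2]
  have hn1 : 1 ≤ (A.length : Int) := by
    cases A
    · exact absurd rfl hA
    · simp
  simp only [solution, solution_alt, fib_eq ((A.length : Int) + 1) (by omega)]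
  set n : Int := (A.length : Int) with hn
  set G : List Int := fibsB (n + 1) with hG
  have hG1 : ∀ f ∈ G, 1 ≤ f := fibsB_pos (n + 1)
  have hGs : G.Pairwise (· < ·) := fibsB_sorted (n + 1)
  have hempty : (PySem.Set.empty : PySem.Set Int) = ([] : List Int) := rfl
  have hof : (PySem.Set.ofList [(0:Int)]) = ((0 :: [] : List Int) : PySem.Set Int) := rfl
  rw [hempty, hof]
  by_cases hhit0 : (n + 1 - 0) ∈ G
  · -- the bank is reached in one jump: both return 1
    rw [scanA_none_of_mem n A 0 G [] hGs hhit0,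
      show A.length + 2 = (A.length + 1) + 1 from rfl,
      bfsB_cons (A.length + 1) n A G _ [0] (by simp) 0,
      if_pos ((mem_movesB n G [0]).2 ⟨0, by simp, hhit0⟩)]
    norm_num
  · obtain ⟨t, ha, hb⟩ := scan_grow_sim n A 0 (by norm_num) G hGs hG1 hhit0 [] []
    simp only [List.nil_append] at ha hb
    have hmB : movesB n G [0] = (G.filter (fun f => 0 + f ≤ n + 1)).map (fun f => 0 + f) := by
      rw [movesB_cons, movesB]; simp
    have hnohit : ¬ (n + 1) ∈ movesB n G [0] := fun hm => hhit0 (by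
      obtain ⟨p, hp, hm'⟩ := (mem_movesB n G [0]).1 hm
      simp at hp
      subst hp
      exact hm')
    rw [ha, show A.length + 2 = (A.length + 1) + 1 from rfl,
      bfsB_cons (A.length + 1) n A G _ [0] (by simp) 0,
      if_neg hnohit, hmB, hb]
    by_cases h3n : 3 ≤ n
    · -- main simulation from level 2
      obtain ⟨_, habs1, hnew1, hnd1⟩ := scanA_some_facts n A 0 G [] t hGs ha
      have hstep := jump_sim n A G hG1 hGs (one_mem_fibsB _ (by omega)) (two_mem_fibsB _ (by omega))
        (three_mem_fibsB _ (by omega)) (A.length + 1) 2 [] t (by norm_num) (by omega)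
        (fun _ => h3n) ?_ (by norm_num) ?_
      · simpa using hstep
      · refine ⟨?_, ?_, by simpa using hnd1 List.nodup_nil⟩
        · intro p hp
          simp only [List.mem_cons] at hp
          rcases hp with rfl | hp
          · exact ⟨hhit0, fun f hf hle hl => by simpa using habs1 f hf hle hl⟩
          · simp at hp
        · intro q hq
          simp only [List.nil_append] at hq
          rcases hnew1 q hq with hh | ⟨hq1, hq2, f, hf, hq3⟩
          · simp at hh
          · have := hG1 f hf
            exact ⟨by omega, hq1, hq2⟩
      · rw [PySem.List.length_pyRange_one]
        omega
    · -- n ∈ {1,2} : impossible, the first scan would have hit the bank (n+1 ∈ {2,3} is Fibonacci)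
      exfalso
      apply hhit0
      have hA12 : n = 1 ∨ n = 2 := by omega
      rcases hA12 with h | h <;> rw [hG] <;> simp only [h] <;> norm_num
      · exact two_mem_fibsB 2 (by norm_num)
      · exact three_mem_fibsB 3 (by norm_num)

-- ===== VERDICT (by name: the statement is the Claim_ definition above) =====
theorem solution_spec : Claim_equal_solution := by
  intro A _
  unfold Spec_solution
  exact solution_eq_alt A
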